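-- pv_equiv track=rewrite | github.com/NuageRoue/CUPGE1 | ALGO/Project/puissance4.py | a_gagne_diag1
-- ===== SOURCE A (Python) =====
-- def a_gagne_diag1(grille: list, joueur: int) -> bool:
--     """
--         fonction qui verifie sur la diagonale montante la victoire du joueur passe en entree, renvoyant True si il existe une combinaison sur la diagonale du numero du joueur dans le tableau
--
--         on a donc :
--         -grille, une liste de liste d'entiers appartenant a {0,1,2} ;
--         -joueur, un entier appartenant a {1,2}
--
--         ici encore, on ne verifie pas les valeurs, la fonction etant appelee par la boucle principale avec des valeurs forcement vraie;
--         cependant, a moins d'une erreur de type TypeError (mauvais type en entree) ou IndexError (tableau non valide) qui n'arrive pas lors de la boucle principale,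
--         pas d'erreur possible, juste un fonctionnement inutile :
--
--         exemple :
--     2 cas valides :
--     >>> a_gagne_diag1([[1,1,1,1,0,0,0], [1,1,0,0,0,0,0], [1,0,1,0,0,0,0], [1,0,0,1,0,0,0], [0,0,0,0,0,0,0], [0,0,0,0,0,0,0]], 1)
--     True
--
--     >>> a_gagne_diag1([[1,0,0,0,0,0,0], [1,0,0,0,0,0,0], [1,0,0,0,0,0,0], [1,0,0,0,0,0,0], [0,0,0,0,0,0,0], [0,0,0,0,0,0,0]], 2)
--     False
--
--     2 cas "non valide"
--     >>> a_gagne_diag1([[1,0,0,0,0,0,0], [1,0,0,0,0,0,0], [1,0,0,0,0,0,0], [1,0,0,0,0,0,0], [0,0,0,0,0,0,0], [0,0,0,0,0,0,0]], 4)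
--     False
--
--     >>> a_gagne_diag1([[3,3,3,3,0,0,0], [1,3,0,0,0,0,0], [1,0,3,0,0,0,0], [1,0,0,3,0,0,0], [0,0,0,0,0,0,0], [0,0,0,0,0,0,0]], 3)
--     True
--
--     """
--     nb_col = len(grille[-1])
--     nb_lig = len(grille)
--     for i in range(nb_lig):
--         for j in range(nb_col):
--             if grille[i][j] == joueur: #meme principe, mais selon la diagonale montante
--                 looked_lig = i
--                 looked_col = j
--                 align = 0
--                 while (looked_lig < nb_lig and looked_col < nb_col) and grille[looked_lig][looked_col] == joueur:
--                     align+=1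
--                     looked_lig += 1
--                     looked_col += 1
--                 if align == 4:
--                     return True
--     return False
-- ===== SOURCE B (Python) =====
-- def a_gagne_diag1(grille: list, joueur: int) -> bool:
--     nb_col = len(grille[-1])
--     nb_lig = len(grille)
--     return any(
--         all(grille[i + k][j + k] == joueur for k in range(4))
--         for i in range(nb_lig - 3)
--         for j in range(nb_col - 3)
--     )
-- ===== Notes on version B (the rewrite author's own statement) =====
-- stated objective: simpler
-- what changed: A walks a variable-length diagonal run from every matching cell and tests whether the counter hits exactly 4; B directly tests each fixed 4-cell down-right diagonal window with an any/all comprehension, with no run counter and no exact-4 test.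
import Mathlib
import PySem

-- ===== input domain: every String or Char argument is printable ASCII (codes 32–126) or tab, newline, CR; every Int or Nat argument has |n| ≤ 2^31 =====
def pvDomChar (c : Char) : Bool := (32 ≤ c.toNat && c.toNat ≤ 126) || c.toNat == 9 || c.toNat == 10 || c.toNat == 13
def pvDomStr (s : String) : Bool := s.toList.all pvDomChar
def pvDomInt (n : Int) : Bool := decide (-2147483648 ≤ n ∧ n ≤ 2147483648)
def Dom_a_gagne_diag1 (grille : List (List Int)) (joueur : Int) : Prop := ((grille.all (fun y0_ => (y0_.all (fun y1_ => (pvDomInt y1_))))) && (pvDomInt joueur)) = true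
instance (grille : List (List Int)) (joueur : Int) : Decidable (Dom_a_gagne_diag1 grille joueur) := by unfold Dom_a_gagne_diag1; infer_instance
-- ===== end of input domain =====

-- B replaces A's per-cell run walk (align counter scanned until it leaves the grid) by a direct
-- check of every 4-cell down-right diagonal window; simpler, same result on all valid grids.


-- ===== PORT A =====
-- grille[i][j] as an Option (none exactly where Python would raise IndexError)
def pvCell (g : List (List Int)) (i j : Int) : Option Int :=
  (PySem.List.pyGet? g i).bind (fun row => PySem.List.pyGet? row j)

-- A's inner while loop; fuel (nbLig - looked_lig).toNat bounds the iterations (looked_lig grows by 1)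
def pvAlign (g : List (List Int)) (joueur nbLig nbCol : Int) :
    Nat → Int → Int → Int → Int
  | 0, _, _, align => align
  | fuel+1, ll, lc, align =>
    if ll < nbLig ∧ lc < nbCol ∧ pvCell g ll lc = some joueur then
      pvAlign g joueur nbLig nbCol fuel (ll+1) (lc+1) (align+1)
    else align

def a_gagne_diag1 (grille : List (List Int)) (joueur : Int) : Bool :=
  match PySem.List.pyGet? grille (-1) with
  | none => false          -- Python raises IndexError on empty grille; excluded by Pre_
  | some lastRow =>
    let nbCol : Int := lastRow.length
    let nbLig : Int := grille.length
    (PySem.List.pyRange 0 nbLig 1).any (fun i =>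
      (PySem.List.pyRange 0 nbCol 1).any (fun j =>
        decide (pvCell grille i j = some joueur) &&
        decide (pvAlign grille joueur nbLig nbCol (nbLig - i).toNat i j 0 = 4)))

-- ===== PORT B =====
def a_gagne_diag1_alt (grille : List (List Int)) (joueur : Int) : Bool :=
  match PySem.List.pyGet? grille (-1) with
  | none => false          -- Python raises IndexError on empty grille; excluded by Pre_
  | some lastRow =>
    let nbCol : Int := lastRow.length
    let nbLig : Int := grille.length
    (PySem.List.pyRange 0 (nbLig - 3) 1).any (fun i =>
      (PySem.List.pyRange 0 (nbCol - 3) 1).any (fun j =>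
        (PySem.List.pyRange 0 4 1).all (fun k =>
          decide (pvCell grille (i + k) (j + k) = some joueur))))

-- ===== PRECONDITION & SPEC =====
-- Pre_ excludes exactly the inputs where Python A raises IndexError: the empty grid
-- (grille[-1]) and ragged grids with a row shorter than the last row (grille[i][j]).
def Pre_a_gagne_diag1 (grille : List (List Int)) (joueur : Int) : Prop :=
  grille ≠ [] ∧ ∀ row ∈ grille, (grille.getLast?.getD []).length ≤ row.length
instance (grille : List (List Int)) (joueur : Int) : Decidable (Pre_a_gagne_diag1 grille joueur) := by unfold Pre_a_gagne_diag1; infer_instance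
def pvWitness_a_gagne_diag1 : List (List Int) × Int := ([[1,1,0],[0,1,1],[2,0,1]], 1)

def Spec_a_gagne_diag1 (grille : List (List Int)) (joueur : Int) (out : Bool) : Prop := out = a_gagne_diag1_alt grille joueur
instance (grille : List (List Int)) (joueur : Int) (out : Bool) : Decidable (Spec_a_gagne_diag1 grille joueur out) := by unfold Spec_a_gagne_diag1; infer_instance

-- ===== CLAIM (what is proved, stated in full; the proofs are below) =====
def Claim_equal_a_gagne_diag1 : Prop := ∀ (grille : List (List Int)) (joueur : Int), Dom_a_gagne_diag1 grille joueur → Pre_a_gagne_diag1 grille joueur → Spec_a_gagne_diag1 grille joueur (a_gagne_diag1 grille joueur)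

-- ===== LEMMAS AND PROOFS =====

-- the accumulator is additive
theorem pvAlign_acc (g : List (List Int)) (joueur L C : Int) :
    ∀ (fuel : Nat) (ll lc a : Int),
      pvAlign g joueur L C fuel ll lc a = a + pvAlign g joueur L C fuel ll lc 0 := by
  intro fuel
  induction fuel with
  | zero => intro ll lc a; simp [pvAlign]
  | succ n ih =>
    intro ll lc a
    simp only [pvAlign]
    split_ifs with h
    · rw [ih (ll+1) (lc+1) (a+1), ih (ll+1) (lc+1) (0+1)]; ring
    · simp

theorem pvAlign_nonneg (g : List (List Int)) (joueur L C : Int) :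
    ∀ (fuel : Nat) (ll lc : Int), 0 ≤ pvAlign g joueur L C fuel ll lc 0 := by
  intro fuel
  induction fuel with
  | zero => intro ll lc; simp [pvAlign]
  | succ n ih =>
    intro ll lc
    simp only [pvAlign]
    split_ifs with h
    · rw [pvAlign_acc]; have := ih (ll+1) (lc+1); omega
    · omega

-- A's align value started at cell (i, j) with its actual fuel
def pvA (g : List (List Int)) (joueur C : Int) (i j : Int) : Int :=
  pvAlign g joueur (g.length : Int) C ((g.length : Int) - i).toNat i j 0

def pvCond (g : List (List Int)) (joueur C : Int) (i j : Int) : Prop :=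
  i < (g.length : Int) ∧ j < C ∧ pvCell g i j = some joueur

theorem pvA_step_neg (g : List (List Int)) (joueur C : Int) (i j : Int)
    (h : ¬ pvCond g joueur C i j) : pvA g joueur C i j = 0 := by
  unfold pvA
  cases hf : ((g.length : Int) - i).toNat with
  | zero => simp [pvAlign]
  | succ n => simp only [pvAlign]; rw [if_neg (by exact h)]

theorem pvA_step_pos (g : List (List Int)) (joueur C : Int) (i j : Int)
    (h : pvCond g joueur C i j) :
    pvA g joueur C i j = pvA g joueur C (i+1) (j+1) + 1 := by
  obtain ⟨hL, hC, hc⟩ := h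
  have hf : ((g.length : Int) - i).toNat = ((g.length : Int) - (i+1)).toNat + 1 := by omega
  unfold pvA
  rw [hf]
  simp only [pvAlign]
  rw [if_pos ⟨hL, hC, hc⟩, pvAlign_acc]
  ring

theorem pvA_pos (g : List (List Int)) (joueur C : Int) (i j : Int)
    (h : pvA g joueur C i j ≠ 0) :
    pvCond g joueur C i j ∧ pvA g joueur C i j = pvA g joueur C (i+1) (j+1) + 1 := by
  by_cases hc : pvCond g joueur C i j
  · exact ⟨hc, pvA_step_pos g joueur C i j hc⟩
  · exact absurd (pvA_step_neg g joueur C i j hc) h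

theorem pvA_down (g : List (List Int)) (joueur C : Int) :
    ∀ (m : Nat) (i j : Int), pvA g joueur C i j = (m : Int) + 4 →
      pvA g joueur C (i + (m : Int)) (j + (m : Int)) = 4 := by
  intro m
  induction m with
  | zero => intro i j h; simpa using h
  | succ n ih =>
    intro i j h
    have hne : pvA g joueur C i j ≠ 0 := by omega
    obtain ⟨-, hstep⟩ := pvA_pos g joueur C i j hne
    have h' : pvA g joueur C (i+1) (j+1) = (n : Int) + 4 := by
      push_cast at h ⊢; omega
    have := ih (i+1) (j+1) h'
    have e1 : i + ((n+1 : Nat) : Int) = (i+1) + (n : Int) := by push_cast; ring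
    have e2 : j + ((n+1 : Nat) : Int) = (j+1) + (n : Int) := by push_cast; ring
    rw [e1, e2]; exact this

theorem pvA_four (g : List (List Int)) (joueur C : Int) (i j : Int)
    (h : pvA g joueur C i j = 4) :
    pvCond g joueur C i j ∧ pvCond g joueur C (i+1) (j+1) ∧
    pvCond g joueur C (i+2) (j+2) ∧ pvCond g joueur C (i+3) (j+3) := by
  obtain ⟨c0, s0⟩ := pvA_pos g joueur C i j (by omega)
  obtain ⟨c1, s1⟩ := pvA_pos g joueur C (i+1) (j+1) (by omega)
  rw [show i+1+1 = i+2 by ring, show j+1+1 = j+2 by ring] at s1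
  obtain ⟨c2, s2⟩ := pvA_pos g joueur C (i+2) (j+2) (by omega)
  rw [show i+2+1 = i+3 by ring, show j+2+1 = j+3 by ring] at s2
  obtain ⟨c3, s3⟩ := pvA_pos g joueur C (i+3) (j+3) (by omega)
  exact ⟨c0, c1, c2, c3⟩

theorem pvA_window (g : List (List Int)) (joueur C : Int) (i j : Int)
    (c0 : pvCond g joueur C i j) (c1 : pvCond g joueur C (i+1) (j+1))
    (c2 : pvCond g joueur C (i+2) (j+2)) (c3 : pvCond g joueur C (i+3) (j+3)) :
    4 ≤ pvA g joueur C i j := by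
  have s0 := pvA_step_pos g joueur C i j c0
  have s1 := pvA_step_pos g joueur C (i+1) (j+1) c1
  rw [show i+1+1 = i+2 by ring, show j+1+1 = j+2 by ring] at s1
  have s2 := pvA_step_pos g joueur C (i+2) (j+2) c2
  rw [show i+2+1 = i+3 by ring, show j+2+1 = j+3 by ring] at s2
  have s3 := pvA_step_pos g joueur C (i+3) (j+3) c3
  rw [show i+3+1 = i+4 by ring, show j+3+1 = j+4 by ring] at s3
  have h4 : 0 ≤ pvA g joueur C (i+4) (j+4) := pvAlign_nonneg g joueur _ C _ _ _
  omega

-- the two scans agree (for any nbCol value C)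
theorem pvAny_eq (g : List (List Int)) (joueur C : Int) :
    ((PySem.List.pyRange 0 (g.length : Int) 1).any (fun i =>
      (PySem.List.pyRange 0 C 1).any (fun j =>
        decide (pvCell g i j = some joueur) &&
        decide (pvAlign g joueur (g.length : Int) C ((g.length : Int) - i).toNat i j 0 = 4)))) =
    ((PySem.List.pyRange 0 ((g.length : Int) - 3) 1).any (fun i =>
      (PySem.List.pyRange 0 (C - 3) 1).any (fun j =>
        (PySem.List.pyRange 0 4 1).all (fun k =>
          decide (pvCell g (i + k) (j + k) = some joueur))))) := by
  rw [Bool.eq_iff_iff]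
  simp only [List.any_eq_true, List.all_eq_true, PySem.List.mem_pyRange_one,
    Bool.and_eq_true, decide_eq_true_eq]
  constructor
  · rintro ⟨i, ⟨hi0, hiL⟩, j, ⟨hj0, hjC⟩, hcell, halign⟩
    obtain ⟨c0, c1, c2, c3⟩ := pvA_four g joueur C i j halign
    refine ⟨i, ⟨hi0, by have := c3.1; omega⟩, j, ⟨hj0, by have := c3.2.1; omega⟩, ?_⟩
    intro k hk
    have : k = 0 ∨ k = 1 ∨ k = 2 ∨ k = 3 := by omega
    rcases this with rfl | rfl | rfl | rfl
    · simpa using c0.2.2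
    · exact c1.2.2
    · exact c2.2.2
    · exact c3.2.2
  · rintro ⟨i, ⟨hi0, hiL⟩, j, ⟨hj0, hjC⟩, hall⟩
    have c : ∀ k : Int, 0 ≤ k → k < 4 → pvCond g joueur C (i + k) (j + k) := by
      intro k h0 h4
      exact ⟨by omega, by omega, hall k ⟨h0, h4⟩⟩
    have c0 := c 0 (by omega) (by omega)
    have c1 := c 1 (by omega) (by omega)
    have c2 := c 2 (by omega) (by omega)
    have c3 := c 3 (by omega) (by omega)
    simp only [add_zero] at c0
    have hge : 4 ≤ pvA g joueur C i j := pvA_window g joueur C i j c0 c1 c2 c3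
    set m : Nat := (pvA g joueur C i j - 4).toNat with hm
    have heq : pvA g joueur C i j = (m : Int) + 4 := by omega
    have h4 := pvA_down g joueur C m i j heq
    obtain ⟨⟨hL, hC, hc⟩, -⟩ := pvA_pos g joueur C (i + (m : Int)) (j + (m : Int)) (by omega)
    exact ⟨i + m, ⟨by positivity, hL⟩, j + m, ⟨by positivity, hC⟩, hc, h4⟩

theorem ports_eq (g : List (List Int)) (joueur : Int) :
    a_gagne_diag1 g joueur = a_gagne_diag1_alt g joueur := by
  unfold a_gagne_diag1 a_gagne_diag1_alt
  cases h : PySem.List.pyGet? g (-1) with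
  | none => rfl
  | some lastRow => exact pvAny_eq g joueur (lastRow.length : Int)

-- ===== VERDICT (by name: the statement is the Claim_ definition above) =====
theorem a_gagne_diag1_spec : Claim_equal_a_gagne_diag1 := by
  intro g joueur _ _
  unfold Spec_a_gagne_diag1
  exact ports_eq g joueur
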